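-- pv_equiv track=rewrite | github.com/MrBrantCode/unitest_baseline | mut_generate/mist_train_taco/taco_2417/solution.py | find_max_product
-- ===== SOURCE A (Python) =====
-- def find_max_product(A):
--     MOD = 10**9 + 7
--
--     if len(A) == 1:
--         return A[0] % MOD
--
--     neg_arr = []
--     pos_arr = []
--
--     for num in A:
--         if num < 0:
--             neg_arr.append(num)
--         elif num > 0:
--             pos_arr.append(num)
--
--     if len(neg_arr) % 2 != 0:
--         neg_arr.remove(max(neg_arr))
--
--     if not pos_arr and not neg_arr:
--         return 0
--
--     ans = 1
--     for num in pos_arr: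
--         ans = (ans * num) % MOD
--     for num in neg_arr:
--         ans = (ans * num) % MOD
--
--     return ans
-- ===== SOURCE B (Python) =====
-- def find_max_product(A):
--     MOD = 10**9 + 7
--     if len(A) == 1:
--         return A[0] % MOD
--     s = sorted(A)
--     negs = sum(1 for x in s if x < 0)
--     skip = negs - 1 if negs % 2 else -1
--     ans = None
--     for i, x in enumerate(s):
--         if x != 0 and i != skip:
--             ans = ((1 if ans is None else ans) * x) % MOD
--     return 0 if ans is None else ans
-- ===== Notes on version B (the rewrite author's own statement) =====
-- stated objective: alternative
-- what changed: Replaces the negative/positive partition lists with remove(max(...)) by a single sort followed by one indexed pass that multiplies every nonzero element modulo 1e9+7, skipping the last element of the leading negative block when the negative count is odd.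
import Mathlib
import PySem

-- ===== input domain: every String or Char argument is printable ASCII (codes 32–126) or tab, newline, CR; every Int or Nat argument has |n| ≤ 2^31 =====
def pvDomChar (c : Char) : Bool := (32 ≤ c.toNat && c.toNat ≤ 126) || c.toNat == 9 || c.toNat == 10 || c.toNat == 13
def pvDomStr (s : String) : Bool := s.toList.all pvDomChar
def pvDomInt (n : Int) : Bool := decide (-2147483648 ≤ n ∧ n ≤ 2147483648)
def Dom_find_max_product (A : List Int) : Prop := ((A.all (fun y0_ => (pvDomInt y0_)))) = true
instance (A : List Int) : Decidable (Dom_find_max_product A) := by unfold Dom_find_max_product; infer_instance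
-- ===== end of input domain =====

-- B replaces A's two partition lists + max()/remove() by one sort and a single indexed
-- modular-product pass that skips the last negative when the negative count is odd (alternative decomposition).

-- ===== PORT A =====
def find_max_product (A : List Int) : Int :=
  let MOD : Int := 10 ^ 9 + 7
  if A.length = 1 then
    PySem.Int.mod ((PySem.List.pyGet? A 0).getD 0) MOD
  else
    let arrs := A.foldl (fun (q : List Int × List Int) num =>
        if num < 0 then (q.1 ++ [num], q.2)
        else if num > 0 then (q.1, q.2 ++ [num])
        else q) ([], [])
    let neg_arr := arrs.1
    let pos_arr := arrs.2
    let neg_arr :=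
      if neg_arr.length % 2 ≠ 0 then
        (PySem.List.remove? neg_arr ((PySem.List.max? neg_arr (fun x => x)).getD 0)).getD neg_arr
      else neg_arr
    if pos_arr = [] ∧ neg_arr = [] then 0
    else
      let ans : Int := pos_arr.foldl (fun ans num => PySem.Int.mod (ans * num) MOD) 1
      neg_arr.foldl (fun ans num => PySem.Int.mod (ans * num) MOD) ans

-- ===== PORT B =====
def find_max_product_alt (A : List Int) : Int :=
  let MOD : Int := 10 ^ 9 + 7
  if A.length = 1 then
    PySem.Int.mod ((PySem.List.pyGet? A 0).getD 0) MOD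
  else
    let s := PySem.List.sorted A (fun x => x) false
    let negs : Int := s.foldl (fun acc x => if x < 0 then acc + 1 else acc) 0
    let skip : Int := if PySem.Int.mod negs 2 ≠ 0 then negs - 1 else -1
    let ans : Option Int := (PySem.List.enumerate s).foldl
      (fun (ans : Option Int) ix =>
        if ix.2 ≠ 0 ∧ ix.1 ≠ skip then
          some (PySem.Int.mod ((ans.getD 1) * ix.2) MOD)
        else ans) none
    ans.getD 0

-- ===== PRECONDITION & SPEC =====
def Spec_find_max_product (A : List Int) (out : Int) : Prop := out = find_max_product_alt A
instance (A : List Int) (out : Int) : Decidable (Spec_find_max_product A out) := by unfold Spec_find_max_product; infer_instance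

-- ===== CLAIM (what is proved, stated in full; the proofs are below) =====
def Claim_equal_find_max_product : Prop := ∀ (A : List Int), Dom_find_max_product A → Spec_find_max_product A (find_max_product A)

-- ===== LEMMAS AND PROOFS =====

-- abbreviations for the pieces of the two programs
def pvNegA (A : List Int) : List Int := A.filter (fun x => decide (x < 0))
def pvPosA (A : List Int) : List Int := A.filter (fun x => decide (0 < x))
def pvKeptA (A : List Int) : List Int :=
  pvPosA A ++ (if (pvNegA A).length % 2 = 1 then
      (pvNegA A).erase ((PySem.List.max? (pvNegA A) (fun x => x)).getD 0)
    else pvNegA A)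
def pvS (A : List Int) : List Int := PySem.List.sorted A (fun x => x) false
def pvNegs (A : List Int) : Nat := (pvS A).countP (fun x => decide (x < 0))
def pvSkip (A : List Int) : Int := if pvNegs A % 2 = 1 then (pvNegs A : Int) - 1 else -1
def pvKeptB (A : List Int) : List Int :=
  ((PySem.List.enumerate (pvS A)).filter
      (fun ix => decide (ix.2 ≠ 0 ∧ ix.1 ≠ pvSkip A))).map Prod.snd

-- modular arithmetic for the fold step
lemma pv_mod_mul (a b : Int) :
    PySem.Int.mod (PySem.Int.mod a (10 ^ 9 + 7) * b) (10 ^ 9 + 7)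
      = PySem.Int.mod (a * b) (10 ^ 9 + 7) := by
  rw [PySem.Int.mod_eq_emod_of_pos (by norm_num),
      PySem.Int.mod_eq_emod_of_pos (by norm_num),
      PySem.Int.mod_eq_emod_of_pos (by norm_num),
      Int.mul_emod, Int.emod_emod_of_dvd _ dvd_rfl, ← Int.mul_emod]

lemma pv_foldl_mod (t : List Int) : ∀ a : Int,
    t.foldl (fun ans num => PySem.Int.mod (ans * num) (10 ^ 9 + 7)) (PySem.Int.mod a (10 ^ 9 + 7))
      = PySem.Int.mod (a * t.prod) (10 ^ 9 + 7) := by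
  induction t with
  | nil => intro a; simp
  | cons x t ih =>
      intro a
      simp only [List.foldl_cons, List.prod_cons]
      rw [pv_mod_mul, ih (a * x), mul_assoc]

lemma pv_foldl_one (l : List Int) (h : l ≠ []) :
    l.foldl (fun ans num => PySem.Int.mod (ans * num) (10 ^ 9 + 7)) 1
      = PySem.Int.mod l.prod (10 ^ 9 + 7) := by
  cases l with
  | nil => exact absurd rfl h
  | cons x t =>
      simp only [List.foldl_cons, List.prod_cons]
      have : (1 : Int) * x = x := one_mul x
      rw [show (PySem.Int.mod (1 * x) (10 ^ 9 + 7)) = PySem.Int.mod x (10 ^ 9 + 7) by rw [one_mul]]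
      rw [show PySem.Int.mod x (10 ^ 9 + 7) = PySem.Int.mod ((x : Int)) (10 ^ 9 + 7) from rfl]
      have := pv_foldl_mod t x
      rw [this]

-- the option-valued fold of B over an enumerated list
lemma pv_optfold_some (k : Int) (e : List (Int × Int)) : ∀ v : Int,
    e.foldl (fun (ans : Option Int) ix =>
        if ix.2 ≠ 0 ∧ ix.1 ≠ k then
          some (PySem.Int.mod ((ans.getD 1) * ix.2) (10 ^ 9 + 7))
        else ans) (some v)
      = some (((e.filter (fun ix => decide (ix.2 ≠ 0 ∧ ix.1 ≠ k))).map Prod.snd).foldl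
          (fun ans num => PySem.Int.mod (ans * num) (10 ^ 9 + 7)) v) := by
  induction e with
  | nil => intro v; rfl
  | cons ix e ih =>
      intro v
      by_cases h : ix.2 ≠ 0 ∧ ix.1 ≠ k
      · simp only [List.foldl_cons, if_pos h, List.filter_cons, decide_eq_true h, Option.getD_some]
        exact ih _
      · simp only [List.foldl_cons, if_neg h, List.filter_cons, decide_eq_false h]
        exact ih v

lemma pv_optfold_none (k : Int) (e : List (Int × Int)) :
    e.foldl (fun (ans : Option Int) ix =>
        if ix.2 ≠ 0 ∧ ix.1 ≠ k then
          some (PySem.Int.mod ((ans.getD 1) * ix.2) (10 ^ 9 + 7))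
        else ans) none
      = (match (e.filter (fun ix => decide (ix.2 ≠ 0 ∧ ix.1 ≠ k))).map Prod.snd with
         | [] => none
         | h :: t => some (t.foldl (fun ans num => PySem.Int.mod (ans * num) (10 ^ 9 + 7))
              (PySem.Int.mod (1 * h) (10 ^ 9 + 7)))) := by
  induction e with
  | nil => rfl
  | cons ix e ih =>
      by_cases h : ix.2 ≠ 0 ∧ ix.1 ≠ k
      · simp only [List.foldl_cons, if_pos h, List.filter_cons, decide_eq_true h, Option.getD_none]
        exact pv_optfold_some k e _
      · simp only [List.foldl_cons, if_neg h, List.filter_cons, decide_eq_false h]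
        exact ih

-- the partition loop of A
lemma pv_partition (A : List Int) : ∀ n p : List Int,
    A.foldl (fun (q : List Int × List Int) num =>
        if num < 0 then (q.1 ++ [num], q.2)
        else if num > 0 then (q.1, q.2 ++ [num])
        else q) (n, p)
      = (n ++ A.filter (fun x => decide (x < 0)), p ++ A.filter (fun x => decide (0 < x))) := by
  induction A with
  | nil => intro n p; simp
  | cons x t ih =>
      intro n p
      by_cases h1 : x < 0
      · simp only [List.foldl_cons, if_pos h1, ih, List.filter_cons, decide_eq_true h1,
          decide_eq_false (show ¬ (0 < x) by omega)]
        simp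
      · by_cases h2 : x > 0
        · simp only [List.foldl_cons, if_neg h1, if_pos h2, ih, List.filter_cons,
            decide_eq_false h1, decide_eq_true h2]
          simp
        · simp only [List.foldl_cons, if_neg h1, if_neg h2, ih, List.filter_cons,
            decide_eq_false h1, decide_eq_false h2]
          simp

-- enumerate/sorted structure lemmas
lemma pv_enum_filter_all (l : List Int) (k : Int) : ∀ st : Int, k < st →
    ((PySem.List.enumerate l st).filter (fun ix => decide (ix.2 ≠ 0 ∧ ix.1 ≠ k))).map Prod.snd
      = l.filter (fun x => decide (x ≠ 0)) := by
  induction l with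
  | nil => intro st _; rfl
  | cons x t ih =>
      intro st hst
      rw [PySem.List.enumerate_cons]
      by_cases hx : x = 0
      · simp only [List.filter_cons, hx, decide_eq_false (by simp : ¬((0:Int) ≠ 0 ∧ st ≠ k)),
          decide_eq_false (by simp : ¬((0:Int) ≠ 0))]
        exact ih (st + 1) (by omega)
      · simp only [List.filter_cons,
          decide_eq_true (show x ≠ 0 ∧ st ≠ k from ⟨hx, by omega⟩),
          decide_eq_true hx, if_true, List.map_cons]
        rw [ih (st + 1) (by omega)]

lemma pv_enum_filter_skip (l : List Int) (k : Int) : ∀ st : Int,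
    (∀ x ∈ l, x ≠ 0) → st ≤ k → k < st + l.length →
    ((PySem.List.enumerate l st).filter (fun ix => decide (ix.2 ≠ 0 ∧ ix.1 ≠ k))).map Prod.snd
      = l.take (k - st).toNat ++ l.drop ((k - st).toNat + 1) := by
  induction l with
  | nil => intro st _ h1 h2; simp at h2; omega
  | cons x t ih =>
      intro st hl h1 h2
      rw [PySem.List.enumerate_cons]
      by_cases hks : k = st
      · subst hks
        simp only [List.filter_cons, decide_eq_false (by simp : ¬(x ≠ 0 ∧ k ≠ k)),
          Bool.false_eq_true, if_false]
        rw [pv_enum_filter_all t k (k + 1) (by omega)]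
        have : t.filter (fun x => decide (x ≠ 0)) = t :=
          List.filter_eq_self.mpr (fun a ha => decide_eq_true (hl a (List.mem_cons_of_mem _ ha)))
        rw [this]
        simp
      · have hx : x ≠ 0 := hl x List.mem_cons_self
        simp only [List.filter_cons,
          decide_eq_true (show x ≠ 0 ∧ st ≠ k from ⟨hx, fun h => hks h.symm⟩), if_true,
          List.map_cons]
        rw [ih (st + 1) (fun a ha => hl a (List.mem_cons_of_mem _ ha)) (by omega)
            (by simp at h2 ⊢; omega)]
        have hn : (k - st).toNat = (k - (st + 1)).toNat + 1 := by omega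
        rw [hn, List.take_succ_cons, List.drop_succ_cons, List.cons_append]

lemma pv_sorted_filter_neg_take (s : List Int) (hs : s.Pairwise (· ≤ ·)) :
    s.filter (fun x => decide (x < 0)) = s.take (s.countP (fun x => decide (x < 0))) := by
  induction s with
  | nil => rfl
  | cons x t ih =>
      rcases List.pairwise_cons.mp hs with ⟨hx, ht⟩
      by_cases h : x < 0
      · simp only [List.filter_cons, List.countP_cons, decide_eq_true h]
        rw [ih ht]
        simp
      · have hnone : ∀ y ∈ t, ¬ (y < 0) := fun y hy => by have := hx y hy; omega
        have hf : t.filter (fun x => decide (x < 0)) = [] :=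
          List.filter_eq_nil_iff.mpr (fun a ha => by simp [hnone a ha])
        have hc : t.countP (fun x => decide (x < 0)) = 0 :=
          List.countP_eq_zero.mpr (fun a ha => by simp [hnone a ha])
        simp [decide_eq_false h, hf, hc]

-- value of A in terms of pvKeptA
lemma pv_charA (A : List Int) (h1 : A.length ≠ 1) :
    find_max_product A
      = (if pvKeptA A = [] then 0 else PySem.Int.mod (pvKeptA A).prod (10 ^ 9 + 7)) := by
  unfold find_max_product
  rw [if_neg h1]
  simp only [pv_partition A [] [], List.nil_append]
  set neg := A.filter (fun x => decide (x < 0)) with hnegdef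
  set pos := A.filter (fun x => decide (0 < x)) with hposdef
  have hKA : pvKeptA A = pos ++ (if neg.length % 2 = 1 then
      neg.erase ((PySem.List.max? neg (fun x => x)).getD 0) else neg) := rfl
  by_cases hodd : neg.length % 2 = 1
  · -- odd: remove? rewrites to erase
    have hne : neg ≠ [] := by
      intro h; rw [h] at hodd; simp at hodd
    obtain ⟨m, hm⟩ : ∃ m, PySem.List.max? neg (fun x => x) = some m := by
      cases hm : PySem.List.max? neg (fun x => x) with
      | none => exact absurd ((PySem.List.max?_eq_none_iff neg _).mp hm) hne
      | some m => exact ⟨m, rfl⟩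
    have hmem : m ∈ neg := PySem.List.max?_mem hm
    have hrem : PySem.List.remove? neg m = some (neg.erase m) :=
      PySem.List.remove?_eq_some_erase neg m hmem
    rw [if_pos (by omega : neg.length % 2 ≠ 0)]
    rw [hm]
    simp only [Option.getD_some, hrem]
    rw [hKA, if_pos hodd, hm]
    simp only [Option.getD_some]
    set neg' := neg.erase m with hneg'
    by_cases hz : pos = [] ∧ neg' = []
    · rw [if_pos hz, if_pos (by simp [hz.1, hz.2])]
    · rw [if_neg hz, if_neg (by
        intro h
        exact hz ⟨(List.append_eq_nil_iff.mp h).1, (List.append_eq_nil_iff.mp h).2⟩)]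
      rw [← List.foldl_append]
      exact pv_foldl_one _ (by
        intro h
        exact hz ⟨(List.append_eq_nil_iff.mp h).1, (List.append_eq_nil_iff.mp h).2⟩)
  · rw [if_neg (by omega : ¬ neg.length % 2 ≠ 0)]
    rw [hKA, if_neg hodd]
    by_cases hz : pos = [] ∧ neg = []
    · rw [if_pos hz, if_pos (by simp [hz.1, hz.2])]
    · rw [if_neg hz, if_neg (by
        intro h
        exact hz ⟨(List.append_eq_nil_iff.mp h).1, (List.append_eq_nil_iff.mp h).2⟩)]
      rw [← List.foldl_append]
      exact pv_foldl_one _ (by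
        intro h
        exact hz ⟨(List.append_eq_nil_iff.mp h).1, (List.append_eq_nil_iff.mp h).2⟩)

-- value of B in terms of pvKeptB
lemma pv_charB (A : List Int) (h1 : A.length ≠ 1) :
    find_max_product_alt A
      = (if pvKeptB A = [] then 0 else PySem.Int.mod (pvKeptB A).prod (10 ^ 9 + 7)) := by
  unfold find_max_product_alt
  rw [if_neg h1]
  simp only [PySem.List.foldl_ite_add_one, zero_add]
  have hmodc : PySem.Int.mod ((((PySem.List.sorted A (fun x => x) false).countP
        (fun x => decide (x < 0)) : Nat)) : Int) 2
      = (((PySem.List.sorted A (fun x => x) false).countP (fun x => decide (x < 0)) % 2 : Nat) : Int) := by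
    exact_mod_cast PySem.Int.mod_natCast ((PySem.List.sorted A (fun x => x) false).countP
        (fun x => decide (x < 0))) 2
  simp only [hmodc]
  have hskip : (if (((PySem.List.sorted A (fun x => x) false).countP
        (fun x => decide (x < 0)) % 2 : Nat) : Int) ≠ 0 then
        ((PySem.List.sorted A (fun x => x) false).countP (fun x => decide (x < 0)) : Int) - 1
      else -1) = pvSkip A := by
    unfold pvSkip pvNegs pvS
    by_cases h : (PySem.List.sorted A (fun x => x) false).countP (fun x => decide (x < 0)) % 2 = 1
    · rw [if_pos h, if_pos (by omega : (((PySem.List.sorted A (fun x => x) false).countP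
        (fun x => decide (x < 0)) % 2 : Nat) : Int) ≠ 0)]
    · rw [if_neg h, if_neg (by omega : ¬ (((PySem.List.sorted A (fun x => x) false).countP
        (fun x => decide (x < 0)) % 2 : Nat) : Int) ≠ 0)]
  simp only [hskip]
  rw [pv_optfold_none (pvSkip A) (PySem.List.enumerate (PySem.List.sorted A (fun x => x) false))]
  have hKB : ((PySem.List.enumerate (PySem.List.sorted A (fun x => x) false)).filter
      (fun ix => decide (ix.2 ≠ 0 ∧ ix.1 ≠ pvSkip A))).map Prod.snd = pvKeptB A := rfl
  rw [hKB]
  cases hK : pvKeptB A with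
  | nil => simp
  | cons h t =>
      rw [if_neg (by simp)]
      simp only
      rw [pv_foldl_mod t (1 * h), Option.getD_some, List.prod_cons, one_mul]

-- the kept multisets agree
lemma pv_perm (A : List Int) : (pvKeptB A).Perm (pvKeptA A) := by
  have hsp : (pvS A).Perm A := PySem.List.sorted_perm A (fun x => x) false
  have hpw : (pvS A).Pairwise (· ≤ ·) := PySem.List.sorted_pairwise A (fun x => x)
  set s := pvS A with hs
  set n := pvNegs A with hn
  have hnle : n ≤ s.length := List.countP_le_length
  have hftake : s.filter (fun x => decide (x < 0)) = s.take n := pv_sorted_filter_neg_take s hpw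
  have hlen_take : (s.take n).length = n := by rw [List.length_take]; omega
  have htake_neg : ∀ x ∈ s.take n, x < 0 := by
    intro x hx
    rw [← hftake] at hx
    exact of_decide_eq_true (List.mem_filter.mp hx).2
  have hcount_take : (s.take n).countP (fun x => decide (x < 0)) = n := by
    rw [List.countP_eq_length.mpr (fun a ha => decide_eq_true (htake_neg a ha)), hlen_take]
  have hdrop_nonneg : ∀ x ∈ s.drop n, ¬ x < 0 := by
    have hsplit : s.take n ++ s.drop n = s := List.take_append_drop n s
    have : n = (s.take n).countP (fun x => decide (x < 0)) + (s.drop n).countP (fun x => decide (x < 0)) := by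
      rw [← List.countP_append, hsplit]; rfl
    have hz : (s.drop n).countP (fun x => decide (x < 0)) = 0 := by omega
    intro x hx hlt
    have := List.countP_eq_zero.mp hz x hx
    simp [hlt] at this
  have hdrop_filter : (s.drop n).filter (fun x => decide (x ≠ 0))
      = (s.drop n).filter (fun x => decide (0 < x)) :=
    List.filter_congr (fun x hx => by
      have := hdrop_nonneg x hx
      by_cases h0 : x = 0 <;> simp [h0]; omega)
  have hpos_filter : s.filter (fun x => decide (0 < x)) = (s.drop n).filter (fun x => decide (0 < x)) := by
    conv_lhs => rw [← List.take_append_drop n s]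
    rw [List.filter_append, List.filter_eq_nil_iff.mpr
      (fun a ha => by have := htake_neg a ha; simp; omega), List.nil_append]
  have hnegperm : (s.take n).Perm (pvNegA A) := by
    rw [← hftake]; exact hsp.filter _
  have hposperm : ((s.drop n).filter (fun x => decide (0 < x))).Perm (pvPosA A) := by
    rw [← hpos_filter]; exact hsp.filter _
  have hlenNegA : (pvNegA A).length = n := by
    rw [← hlen_take]; exact (hnegperm.length_eq).symm
  by_cases hodd : n % 2 = 1
  · -- odd case
    have hn1 : 1 ≤ n := by omega
    have hskip : pvSkip A = (n : Int) - 1 := by rw [pvSkip, ← hn, if_pos hodd]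
    have hKB : pvKeptB A = ((s.take n).take (n - 1) ++ (s.take n).drop n)
        ++ (s.drop n).filter (fun x => decide (x ≠ 0)) := by
      rw [pvKeptB, ← hs]
      simp only [hskip]
      conv_lhs => rw [← List.take_append_drop n s]
      rw [PySem.List.enumerate_append, List.filter_append, List.map_append]
      congr 1
      · rw [pv_enum_filter_skip (s.take n) ((n : Int) - 1) 0
            (fun x hx => by have := htake_neg x hx; omega)
            (by omega) (by rw [hlen_take]; omega)]
        rw [(by omega : ((n : Int) - 1 - 0).toNat = n - 1), (by omega : n - 1 + 1 = n)]
      · rw [hlen_take]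
        rw [pv_enum_filter_all (s.drop n) ((n : Int) - 1) (0 + (n : Int)) (by omega)]
    have hdropn : (s.take n).drop n = [] := by
      rw [List.drop_eq_nil_iff]; omega
    set N := s.take n with hN
    have hNne : N ≠ [] := by
      intro h; rw [h] at hlen_take; simp at hlen_take; omega
    have hNdl : N.take (n - 1) = N.dropLast := by
      rw [List.dropLast_eq_take, hlen_take]
    -- the maximum of the negatives
    have hnegne : pvNegA A ≠ [] := by
      intro h
      rw [h] at hlenNegA; simp at hlenNegA; omega
    obtain ⟨m, hm⟩ : ∃ m, PySem.List.max? (pvNegA A) (fun x => x) = some m := by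
      cases hm : PySem.List.max? (pvNegA A) (fun x => x) with
      | none => exact absurd ((PySem.List.max?_eq_none_iff (pvNegA A) _).mp hm) hnegne
      | some m => exact ⟨m, rfl⟩
    have hm_mem : m ∈ pvNegA A := PySem.List.max?_mem hm
    have hm_max : ∀ y ∈ pvNegA A, y ≤ m := PySem.List.max?_isMax hm
    set m' := N.getLast hNne with hm'
    have hsplitN : N.dropLast ++ [m'] = N := List.dropLast_append_getLast hNne
    have hNpw : N.Pairwise (· ≤ ·) := List.Pairwise.sublist (List.take_sublist n s) hpw
    have hm'_max : ∀ y ∈ N, y ≤ m' := by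
      intro y hy
      rw [← hsplitN] at hy hNpw
      rcases List.mem_append.mp hy with h | h
      · exact (List.pairwise_append.mp hNpw).2.2 y h m' (List.mem_singleton_self m')
      · rw [List.mem_singleton.mp h]
    have hmm' : m = m' := by
      apply le_antisymm
      · exact hm'_max m (hnegperm.mem_iff.mpr hm_mem)
      · exact hm_max m' (hnegperm.mem_iff.mp (List.getLast_mem hNne))
    have hdl_perm : N.dropLast.Perm ((pvNegA A).erase m) := by
      have h1 : N.Perm (m' :: N.erase m') := List.perm_cons_erase (List.getLast_mem hNne)
      have h2 : N.Perm (m' :: N.dropLast) := by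
        conv_lhs => rw [← hsplitN]
        exact List.perm_append_singleton m' N.dropLast
      have h3 : N.dropLast.Perm (N.erase m') := (h2.symm.trans h1).cons_inv
      rw [← hmm'] at h3
      exact h3.trans (hnegperm.erase m)
    have hKA : pvKeptA A = pvPosA A ++ (pvNegA A).erase m := by
      rw [pvKeptA, if_pos (by omega : (pvNegA A).length % 2 = 1), hm, Option.getD_some]
    rw [hKB, hKA, hdropn, List.append_nil, hNdl, hdrop_filter]
    exact ((hdl_perm.append hposperm).trans (List.perm_append_comm))
  · -- even case
    have hskip : pvSkip A = -1 := by rw [pvSkip, ← hn, if_neg hodd]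
    have hKB : pvKeptB A = s.filter (fun x => decide (x ≠ 0)) := by
      rw [pvKeptB, ← hs]
      simp only [hskip]
      exact pv_enum_filter_all s (-1) 0 (by omega)
    have hfsplit : s.filter (fun x => decide (x ≠ 0))
        = s.take n ++ (s.drop n).filter (fun x => decide (x ≠ 0)) := by
      conv_lhs => rw [← List.take_append_drop n s]
      have htake_f : (s.take n).filter (fun x => decide (x ≠ 0)) = s.take n :=
        List.filter_eq_self.mpr
          (fun a ha => decide_eq_true (show a ≠ 0 by have := htake_neg a ha; omega))
      rw [List.filter_append, htake_f]
    have hKA : pvKeptA A = pvPosA A ++ pvNegA A := by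
      rw [pvKeptA, if_neg (by omega : ¬ (pvNegA A).length % 2 = 1)]
    rw [hKB, hfsplit, hKA, hdrop_filter]
    exact ((hnegperm.append hposperm).trans (List.perm_append_comm))

-- ===== VERDICT (by name: the statement is the Claim_ definition above) =====
theorem find_max_product_spec : Claim_equal_find_max_product := by
  intro A _
  unfold Spec_find_max_product
  by_cases h1 : A.length = 1
  · simp [find_max_product, find_max_product_alt, h1]
  · rw [pv_charA A h1, pv_charB A h1, (pv_perm A).prod_eq]
    by_cases hk : pvKeptA A = []
    · have : pvKeptB A = [] := List.Perm.eq_nil (hk ▸ pv_perm A)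
      rw [if_pos hk, if_pos this]
    · have : pvKeptB A ≠ [] := fun h => hk (List.Perm.nil_eq (h ▸ pv_perm A)).symm
      rw [if_neg hk, if_neg this]
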